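-- pv_equiv track=rewrite | github.com/RodrigoBecker/krab-cli | src/krab_cli/core/huffman.py | create_alias_dictionary
-- ===== SOURCE A (Python) =====
-- def create_alias_dictionary(
--     freq_table: dict[str, int],
--     prefix: str = "$",
--     max_aliases: int = 50,
-- ) -> dict[str, str]:
--     """Create short aliases for high-frequency tokens to save tokens.
--
--     Maps long repeated terms to short aliases like $a, $b, ..., $aa, $ab, etc.
--     Returns a dict of {original_term: alias}.
--     """
--     sorted_terms = sorted(freq_table.items(), key=lambda x: (-x[1], -len(x[0])))
--     aliases: dict[str, str] = {}
--     idx = 0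
--
--     for term, freq in sorted_terms[:max_aliases]:
--         # Only alias terms where alias is shorter than original
--         alias = _index_to_alias(idx, prefix)
--         token_savings = (len(term) - len(alias)) * freq
--         if token_savings > 0:
--             aliases[term] = alias
--             idx += 1
--
--     return aliases
--
-- def _index_to_alias(idx: int, prefix: str) -> str:
--     """Convert an index to a short alias string: 0->$a, 25->$z, 26->$aa."""
--     result = ""
--     while True:
--         result = chr(ord("a") + idx % 26) + result
--         idx = idx // 26 - 1
--         if idx < 0:
--             break
--     return f"{prefix}{result}"
-- ===== SOURCE B (Python) =====
-- def create_alias_dictionary(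
--     freq_table: dict[str, int],
--     prefix: str = "$",
--     max_aliases: int = 50,
-- ) -> dict[str, str]:
--     """Create short aliases for high-frequency tokens to save tokens.
--
--     Alternative implementation: sorts descending on the positive key,
--     collects (term, alias) pairs in a list, and generates aliases with an
--     incremented bijective base-26 counter instead of re-deriving each alias
--     from an integer index.
--     """
--     candidates = sorted(
--         freq_table.items(), key=lambda kv: (kv[1], len(kv[0])), reverse=True
--     )[:max_aliases]
--     pairs = []
--     digits = [0]  # bijective base-26 counter, least significant digit first; 0 = 'a'
--     for term, freq in candidates:
--         alias = prefix + "".join(chr(ord("a") + d) for d in reversed(digits))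
--         if (len(term) - len(alias)) * freq > 0:
--             pairs.append((term, alias))
--             digits = _bump(digits)
--     return dict(pairs)
--
--
-- def _bump(digits):
--     """Increment a bijective base-26 digit list (least significant first)."""
--     if not digits:
--         return [0]
--     if digits[0] == 25:
--         return [0] + _bump(digits[1:])
--     return [digits[0] + 1] + digits[1:]
-- ===== Notes on version B (the rewrite author's own statement) =====
-- stated objective: alternative
-- what changed: B sorts descending on the positive (freq, len) key, collects (term, alias) pairs in a plain list turned into a dict at the end, and generates each alias by incrementing a bijective base-26 digit counter instead of re-deriving it from an integer index with divisions.
import Mathlib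
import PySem

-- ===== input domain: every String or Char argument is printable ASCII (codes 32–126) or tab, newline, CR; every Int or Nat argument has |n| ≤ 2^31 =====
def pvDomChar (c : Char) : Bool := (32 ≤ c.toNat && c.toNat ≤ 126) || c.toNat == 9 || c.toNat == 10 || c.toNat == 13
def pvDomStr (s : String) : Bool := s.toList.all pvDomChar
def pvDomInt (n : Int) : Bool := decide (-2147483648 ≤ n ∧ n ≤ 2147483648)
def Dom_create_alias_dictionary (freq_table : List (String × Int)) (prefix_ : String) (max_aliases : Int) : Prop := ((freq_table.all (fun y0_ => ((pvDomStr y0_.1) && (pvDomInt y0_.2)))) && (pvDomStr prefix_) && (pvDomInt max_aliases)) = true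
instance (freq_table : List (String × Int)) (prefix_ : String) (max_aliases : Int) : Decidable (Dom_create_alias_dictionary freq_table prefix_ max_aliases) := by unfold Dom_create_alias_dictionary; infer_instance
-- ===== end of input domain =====

-- B replaces A's negated-key sort + integer alias index by a reverse sort, a pair list turned
-- into a dict at the end, and an incremented bijective base-26 digit counter (objective: alternative).


-- ===== PORT A =====
-- _index_to_alias's while loop: prepend chr(ord('a') + idx % 26), continue on idx // 26 - 1
def indexToAliasChars (idx : Int) : List Char :=
  if PySem.Int.floordiv idx 26 - 1 < 0 then
    [Char.ofNat (97 + (PySem.Int.mod idx 26).toNat)]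
  else
    indexToAliasChars (PySem.Int.floordiv idx 26 - 1) ++ [Char.ofNat (97 + (PySem.Int.mod idx 26).toNat)]
termination_by idx.toNat
decreasing_by
  rw [PySem.Int.floordiv_eq_ediv_of_pos (by norm_num : (0:Int) < 26)] at *
  omega

def _index_to_alias (idx : Int) (prefix_ : String) : String :=
  String.ofList (prefix_.toList ++ indexToAliasChars idx)

def create_alias_dictionary (freq_table : List (String × Int)) (prefix_ : String) (max_aliases : Int) : List (String × String) :=
  let sorted_terms := PySem.List.sorted2 freq_table (fun x => -x.2) (fun x => -(PySem.Str.len x.1)) false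
  let st := (PySem.List.slice sorted_terms none (some max_aliases)).foldl
    (fun (s : PySem.Dict String String × Int) tf =>
      let alias_ := _index_to_alias s.2 prefix_
      if (PySem.Str.len tf.1 - PySem.Str.len alias_) * tf.2 > 0 then (s.1.insert tf.1 alias_, s.2 + 1) else s)
    (PySem.Dict.empty, 0)
  st.1.items

-- ===== PORT B =====
def bumpDigits : List Int → List Int
  | [] => [0]
  | d :: ds => if d = 25 then 0 :: bumpDigits ds else (d + 1) :: ds

def renderAlias (prefix_ : String) (digits : List Int) : String :=
  String.ofList (prefix_.toList ++ digits.reverse.map (fun d => Char.ofNat (97 + d.toNat)))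

def create_alias_dictionary_alt (freq_table : List (String × Int)) (prefix_ : String) (max_aliases : Int) : List (String × String) :=
  let candidates := PySem.List.slice
    (PySem.List.sorted2 freq_table (fun x => x.2) (fun x => PySem.Str.len x.1) true) none (some max_aliases)
  let st := candidates.foldl
    (fun (s : List (String × String) × List Int) tf =>
      let alias_ := renderAlias prefix_ s.2
      if (PySem.Str.len tf.1 - PySem.Str.len alias_) * tf.2 > 0 then (s.1 ++ [(tf.1, alias_)], bumpDigits s.2) else s)
    ([], [0])
  (PySem.Dict.ofList st.1).items

-- ===== PRECONDITION & SPEC =====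
-- Pre_ excludes freq_table lists with duplicate keys: they cannot arise from the Python dict
-- argument, and the association-list reading of such a list is ambiguous.
def Pre_create_alias_dictionary (freq_table : List (String × Int)) (prefix_ : String) (max_aliases : Int) : Prop :=
  (freq_table.map Prod.fst).Nodup
instance (freq_table : List (String × Int)) (prefix_ : String) (max_aliases : Int) : Decidable (Pre_create_alias_dictionary freq_table prefix_ max_aliases) := by unfold Pre_create_alias_dictionary; infer_instance

def pvWitness_create_alias_dictionary : (List (String × Int)) × String × Int :=
  ([("hello", 5), ("ab", 3)], "$", 3)

def Spec_create_alias_dictionary (freq_table : List (String × Int)) (prefix_ : String) (max_aliases : Int) (out : List (String × String)) : Prop := out = create_alias_dictionary_alt freq_table prefix_ max_aliases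
instance (freq_table : List (String × Int)) (prefix_ : String) (max_aliases : Int) (out : List (String × String)) : Decidable (Spec_create_alias_dictionary freq_table prefix_ max_aliases out) := by unfold Spec_create_alias_dictionary; infer_instance

-- ===== CLAIM (what is proved, stated in full; the proofs are below) =====
def Claim_equal_create_alias_dictionary : Prop := ∀ (freq_table : List (String × Int)) (prefix_ : String) (max_aliases : Int), Dom_create_alias_dictionary freq_table prefix_ max_aliases → Pre_create_alias_dictionary freq_table prefix_ max_aliases → Spec_create_alias_dictionary freq_table prefix_ max_aliases (create_alias_dictionary freq_table prefix_ max_aliases)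

-- ===== LEMMAS AND PROOFS =====

-- proof-side model of B's counter: the bijective base-26 digits of idx, least significant first
def lsbDigits (idx : Int) : List Int :=
  if PySem.Int.floordiv idx 26 - 1 < 0 then
    [PySem.Int.mod idx 26]
  else
    PySem.Int.mod idx 26 :: lsbDigits (PySem.Int.floordiv idx 26 - 1)
termination_by idx.toNat
decreasing_by
  rw [PySem.Int.floordiv_eq_ediv_of_pos (by norm_num : (0:Int) < 26)] at *
  omega

lemma lsbDigits_ediv (idx : Int) :
    lsbDigits idx = if idx / 26 - 1 < 0 then [idx % 26] else idx % 26 :: lsbDigits (idx / 26 - 1) := by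
  rw [lsbDigits, PySem.Int.floordiv_eq_ediv_of_pos (by norm_num : (0:Int) < 26),
      PySem.Int.mod_eq_emod_of_pos (by norm_num : (0:Int) < 26)]

lemma lsbDigits_zero : lsbDigits 0 = [0] := by rw [lsbDigits_ediv]; norm_num

lemma bump_lsbDigits (idx : Int) (h : 0 ≤ idx) :
    bumpDigits (lsbDigits idx) = lsbDigits (idx + 1) := by
  induction idx using lsbDigits.induct with
  | case1 idx hlt =>
    rw [PySem.Int.floordiv_eq_ediv_of_pos (by norm_num : (0:Int) < 26)] at hlt
    rw [lsbDigits_ediv idx, if_pos hlt, lsbDigits_ediv (idx+1)]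
    by_cases h25 : idx % 26 = 25
    · have hidx : idx = 25 := by omega
      subst hidx
      norm_num [bumpDigits, lsbDigits_zero]
    · rw [if_pos (by omega)]
      simp only [bumpDigits, if_neg h25]
      congr 1
      omega
  | case2 idx hge ih =>
    rw [PySem.Int.floordiv_eq_ediv_of_pos (by norm_num : (0:Int) < 26)] at hge ih
    rw [lsbDigits_ediv idx, if_neg hge, lsbDigits_ediv (idx+1), if_neg (by omega)]
    by_cases h25 : idx % 26 = 25
    · simp only [bumpDigits, if_pos h25]
      have h1 : (idx + 1) % 26 = 0 := by omega
      have h2 : (idx + 1) / 26 - 1 = (idx / 26 - 1) + 1 := by omega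
      rw [h1, h2, ← ih (by omega)]
    · simp only [bumpDigits, if_neg h25]
      have h1 : (idx + 1) % 26 = idx % 26 + 1 := by omega
      have h2 : (idx + 1) / 26 - 1 = idx / 26 - 1 := by omega
      rw [h1, h2]

lemma indexToAliasChars_eq (idx : Int) :
    indexToAliasChars idx = (lsbDigits idx).reverse.map (fun d => Char.ofNat (97 + d.toNat)) := by
  induction idx using lsbDigits.induct with
  | case1 idx hlt => rw [indexToAliasChars, if_pos hlt, lsbDigits, if_pos hlt]; simp
  | case2 idx hge ih => rw [indexToAliasChars, if_neg hge, lsbDigits, if_neg hge, ih]; simp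

lemma renderAlias_eq (prefix_ : String) (idx : Int) :
    renderAlias prefix_ (lsbDigits idx) = _index_to_alias idx prefix_ := by
  simp [renderAlias, _index_to_alias, indexToAliasChars_eq]

lemma sort_eq (xs : List (String × Int)) :
    PySem.List.sorted2 xs (fun x => -x.2) (fun x => -(PySem.Str.len x.1)) false
      = PySem.List.sorted2 xs (fun x => x.2) (fun x => PySem.Str.len x.1) true := by
  simp only [PySem.List.sorted2]
  congr 1
  funext a b
  norm_num

lemma slice_sublist {α : Type} (xs : List α) (b : Int) :
    (PySem.List.slice xs none (some b)).Sublist xs := by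
  simp only [PySem.List.slice]
  exact (List.take_sublist _ _).trans (List.drop_sublist _ _)

lemma ofList_items_of_nodup {ν : Type} (l : List (String × ν)) (h : (l.map Prod.fst).Nodup) :
    (PySem.Dict.ofList l).items = l := by
  have := PySem.Dict.items_foldl_insert_fresh l Prod.fst Prod.snd PySem.Dict.empty
    (fun a _ => PySem.Dict.contains_empty a.1) h
  simpa [PySem.Dict.ofList, PySem.Dict.update, PySem.Dict.empty] using this

lemma loop_eq (prefix_ : String) :
    ∀ (cand : List (String × Int)) (d : PySem.Dict String String)
      (pairs : List (String × String)) (idx : Int) (digits : List Int),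
      0 ≤ idx → digits = lsbDigits idx → d.items = pairs → d.keys.Nodup →
      (∀ t ∈ cand.map Prod.fst, d.contains t = false) → (cand.map Prod.fst).Nodup →
      (cand.foldl
        (fun (s : PySem.Dict String String × Int) tf =>
          if (PySem.Str.len tf.1 - PySem.Str.len (_index_to_alias s.2 prefix_)) * tf.2 > 0
          then (s.1.insert tf.1 (_index_to_alias s.2 prefix_), s.2 + 1) else s)
        (d, idx)).1.items
        = (cand.foldl
            (fun (s : List (String × String) × List Int) tf =>
              if (PySem.Str.len tf.1 - PySem.Str.len (renderAlias prefix_ s.2)) * tf.2 > 0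
              then (s.1 ++ [(tf.1, renderAlias prefix_ s.2)], bumpDigits s.2) else s)
            (pairs, digits)).1
      ∧ (cand.foldl
          (fun (s : PySem.Dict String String × Int) tf =>
            if (PySem.Str.len tf.1 - PySem.Str.len (_index_to_alias s.2 prefix_)) * tf.2 > 0
            then (s.1.insert tf.1 (_index_to_alias s.2 prefix_), s.2 + 1) else s)
          (d, idx)).1.keys.Nodup := by
  intro cand
  induction cand with
  | nil =>
    intro d pairs idx digits _ _ hitems hkeys _ _
    exact ⟨hitems, hkeys⟩
  | cons tf rest ih =>
    intro d pairs idx digits hidx hdig hitems hkeys hfresh hnodup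
    have halias : renderAlias prefix_ digits = _index_to_alias idx prefix_ := by
      rw [hdig, renderAlias_eq]
    simp only [List.foldl_cons, halias]
    by_cases hc : (PySem.Str.len tf.1 - PySem.Str.len (_index_to_alias idx prefix_)) * tf.2 > 0
    · rw [if_pos hc, if_pos hc]
      have hct : d.contains tf.1 = false := hfresh tf.1 (by simp)
      refine ih (d.insert tf.1 (_index_to_alias idx prefix_)) (pairs ++ [(tf.1, _index_to_alias idx prefix_)])
        (idx + 1) (bumpDigits digits) (by omega) (by rw [hdig, bump_lsbDigits idx hidx]) ?_ ?_ ?_ ?_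
      · rw [PySem.Dict.items_insert_of_not_contains d _ hct, hitems]
      · rw [PySem.Dict.keys_insert_of_not_contains d _ hct]
        simp only [List.map_cons, List.nodup_cons] at hnodup
        refine List.Nodup.append hkeys (by simp) ?_
        intro a ha hb
        simp only [List.mem_singleton] at hb
        rw [hb] at ha
        exact absurd ((PySem.Dict.contains_iff_mem_keys d tf.1).mpr ha) (by simp [hct])
      · intro t ht
        rw [PySem.Dict.contains_insert]
        simp only [List.map_cons, List.nodup_cons] at hnodup
        have : t ≠ tf.1 := fun he => hnodup.1 (he ▸ ht)
        simp [this, hfresh t (by simp [ht])]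
      · exact (List.nodup_cons.mp (by simpa using hnodup)).2
    · rw [if_neg hc, if_neg hc]
      exact ih d pairs idx digits hidx hdig hitems hkeys
        (fun t ht => hfresh t (by simp [ht])) (List.nodup_cons.mp (by simpa using hnodup)).2

-- ===== VERDICT (by name: the statement is the Claim_ definition above) =====
theorem create_alias_dictionary_spec : Claim_equal_create_alias_dictionary := by
  intro freq_table prefix_ max_aliases _ hpre
  unfold Spec_create_alias_dictionary
  simp only [create_alias_dictionary, create_alias_dictionary_alt, sort_eq]
  have hperm := PySem.List.sorted2_perm freq_table (fun x => x.2) (fun x => PySem.Str.len x.1) true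
  have h1 : ((PySem.List.sorted2 freq_table (fun x => x.2) (fun x => PySem.Str.len x.1) true).map Prod.fst).Nodup :=
    ((hperm.map Prod.fst).nodup_iff).mpr hpre
  have h2 := slice_sublist (PySem.List.sorted2 freq_table (fun x => x.2) (fun x => PySem.Str.len x.1) true) max_aliases
  have h3 : ((PySem.List.slice (PySem.List.sorted2 freq_table (fun x => x.2) (fun x => PySem.Str.len x.1) true) none (some max_aliases)).map Prod.fst).Nodup :=
    h1.sublist (h2.map Prod.fst)
  obtain ⟨hitems, hkeys⟩ := loop_eq prefix_
    (PySem.List.slice (PySem.List.sorted2 freq_table (fun x => x.2) (fun x => PySem.Str.len x.1) true) none (some max_aliases))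
    PySem.Dict.empty [] 0 [0] le_rfl lsbDigits_zero.symm rfl (by simp [PySem.Dict.empty, PySem.Dict.keys])
    (fun t _ => PySem.Dict.contains_empty t) h3
  rw [← hitems]
  rw [ofList_items_of_nodup _ (by simpa [PySem.Dict.keys] using hkeys)]
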